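-- pv_equiv track=rewrite | github.com/elijah-fullerton/COS568-LI-SP26 | scripts/run_m3_autoresearch_loop.py | classify_mutation_family
-- ===== SOURCE A (Python) =====
-- from typing import Any, Dict, List, Optional, Tuple
--
-- def classify_mutation_family(changed_files: List[str], families: Dict[str, List[str]]) -> str:
--     if not changed_files:
--         return "no_change"
--     scores = []
--     changed = set(changed_files)
--     for family, relpaths in families.items():
--         overlap = len(changed & set(relpaths))
--         scores.append((overlap, family))
--     scores.sort(reverse=True)
--     if len(scores) >= 2 and scores[0][0] == scores[1][0] and scores[0][0] > 0:
--         return "mixed"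
--     if scores and scores[0][0] > 0:
--         return scores[0][1]
--     return "mixed"
-- ===== SOURCE B (Python) =====
-- from typing import Dict, List
--
-- def classify_mutation_family(changed_files: List[str], families: Dict[str, List[str]]) -> str:
--     if not changed_files:
--         return "no_change"
--     changed = set(changed_files)
--     best = 0
--     best_family = ""
--     ties = 0
--     for family, relpaths in families.items():
--         overlap = len(changed & set(relpaths))
--         if overlap > best:
--             best, best_family, ties = overlap, family, 1
--         elif overlap == best:
--             ties += 1
--     if best > 0 and ties == 1:
--         return best_family
--     return "mixed"
-- ===== Notes on version B (the rewrite author's own statement) =====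
-- stated objective: simpler
-- what changed: Replaces building a score list and sorting it in reverse with a single pass over families that tracks the running maximum overlap, its family, and how many families tie that maximum.
import Mathlib
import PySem

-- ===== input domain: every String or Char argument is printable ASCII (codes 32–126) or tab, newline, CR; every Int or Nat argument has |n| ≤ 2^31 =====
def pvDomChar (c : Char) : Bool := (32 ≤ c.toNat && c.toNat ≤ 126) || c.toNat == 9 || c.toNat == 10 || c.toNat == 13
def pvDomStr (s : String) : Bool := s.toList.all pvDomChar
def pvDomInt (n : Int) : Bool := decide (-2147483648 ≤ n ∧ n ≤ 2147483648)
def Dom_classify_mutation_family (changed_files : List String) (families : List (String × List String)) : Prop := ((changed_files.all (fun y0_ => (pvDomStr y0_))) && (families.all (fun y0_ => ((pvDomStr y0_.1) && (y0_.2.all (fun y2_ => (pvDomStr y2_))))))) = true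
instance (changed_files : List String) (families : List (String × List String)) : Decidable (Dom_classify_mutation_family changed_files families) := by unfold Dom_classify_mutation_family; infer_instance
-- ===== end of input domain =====

-- B replaces A's build-score-list-then-reverse-sort with a single pass tracking the
-- maximum overlap, its family and the number of families tying that maximum (simpler, no sort).

-- ===== PORT A =====
-- overlap = len(changed & set(relpaths)) for one (family, relpaths) item (shared subexpression of A and B)
def pvOverlap (changed : PySem.Set String) (p : String × List String) : Int :=
  PySem.Set.len (PySem.Set.inter changed (PySem.Set.ofList p.2))

def classify_mutation_family (changed_files : List String) (families : List (String × List String)) : String :=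
  if changed_files = [] then "no_change"
  else
    let changed : PySem.Set String := PySem.Set.ofList changed_files
    let scores : List (Int × String) :=
      (PySem.Dict.ofList families).items.foldl
        (fun acc p => acc ++ [(pvOverlap changed p, p.1)]) []
    match PySem.List.sorted2 scores (fun s => s.1) (fun s => s.2) true with
    | [] => "mixed"
    | [s0] => if 0 < s0.1 then s0.2 else "mixed"
    | s0 :: s1 :: _ =>
        if s0.1 = s1.1 ∧ 0 < s0.1 then "mixed"
        else if 0 < s0.1 then s0.2 else "mixed"

-- ===== PORT B =====
def classify_mutation_family_alt (changed_files : List String) (families : List (String × List String)) : String :=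
  if changed_files = [] then "no_change"
  else
    let changed : PySem.Set String := PySem.Set.ofList changed_files
    let st : Int × String × Int :=
      (PySem.Dict.ofList families).items.foldl
        (fun st p =>
          let overlap := pvOverlap changed p
          if st.1 < overlap then (overlap, p.1, 1)
          else if overlap = st.1 then (st.1, st.2.1, st.2.2 + 1)
          else st)
        (0, "", 0)
    if 0 < st.1 ∧ st.2.2 = 1 then st.2.1 else "mixed"

-- ===== PRECONDITION & SPEC =====
def Spec_classify_mutation_family (changed_files : List String) (families : List (String × List String)) (out : String) : Prop := out = classify_mutation_family_alt changed_files families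
instance (changed_files : List String) (families : List (String × List String)) (out : String) : Decidable (Spec_classify_mutation_family changed_files families out) := by unfold Spec_classify_mutation_family; infer_instance

-- ===== CLAIM (what is proved, stated in full; the proofs are below) =====
def Claim_equal_classify_mutation_family : Prop := ∀ (changed_files : List String) (families : List (String × List String)), Dom_classify_mutation_family changed_files families → Spec_classify_mutation_family changed_files families (classify_mutation_family changed_files families)

-- ===== LEMMAS AND PROOFS =====

-- B's loop body, applied to a precomputed (overlap, family) score pair
def pvStep (st : Int × String × Int) (x : Int × String) : Int × String × Int :=
  if st.1 < x.1 then (x.1, x.2, 1)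
  else if x.1 = st.1 then (st.1, st.2.1, st.2.2 + 1)
  else st

-- the comparison sorted2 … true uses between adjacent elements
def pvBefore (a b : Int × String) : Bool :=
  decide (b.1 < a.1) || (!decide (a.1 < b.1) && decide (b.2 < a.2))

lemma sorted2_eq_foldl (sc : List (Int × String)) :
    PySem.List.sorted2 sc (fun s => s.1) (fun s => s.2) true
    = sc.foldl (fun acc x => PySem.List.insertBy pvBefore x acc) [] := rfl

lemma pairwise_insertBy {α : Type} (before : α → α → Bool) (R : α → α → Prop)
    (htrans : ∀ a b c, R a b → R b c → R a c)
    (h1 : ∀ a b, before a b = true → R a b) (h2 : ∀ a b, before a b = false → R b a)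
    (x : α) : ∀ l : List α, l.Pairwise R → (PySem.List.insertBy before x l).Pairwise R := by
  intro l
  induction l with
  | nil => intro _; simp [PySem.List.insertBy]
  | cons y ys ih =>
    intro hp
    rw [List.pairwise_cons] at hp
    obtain ⟨hy, hys⟩ := hp
    show (if before x y = true then x :: y :: ys else y :: PySem.List.insertBy before x ys).Pairwise R
    by_cases hb : before x y = true
    · rw [if_pos hb]
      refine List.Pairwise.cons ?_ (List.Pairwise.cons hy hys)
      intro z hz
      rcases List.mem_cons.mp hz with rfl | hz
      · exact h1 _ _ hb
      · exact htrans _ _ _ (h1 _ _ hb) (hy z hz)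
    · rw [if_neg hb]
      refine List.Pairwise.cons ?_ (ih hys)
      intro z hz
      rw [PySem.List.mem_insertBy] at hz
      rcases hz with rfl | hz
      · exact h2 _ _ (eq_false_of_ne_true hb)
      · exact hy z hz

lemma pairwise_foldl_insertBy {α : Type} (before : α → α → Bool) (R : α → α → Prop)
    (htrans : ∀ a b c, R a b → R b c → R a c)
    (h1 : ∀ a b, before a b = true → R a b) (h2 : ∀ a b, before a b = false → R b a)
    (l : List α) (acc : List α) (hacc : acc.Pairwise R) :
    (l.foldl (fun acc x => PySem.List.insertBy before x acc) acc).Pairwise R := by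
  induction l generalizing acc with
  | nil => simpa using hacc
  | cons x xs ih =>
    simp only [List.foldl_cons]
    exact ih _ (pairwise_insertBy before R htrans h1 h2 x acc hacc)

-- sorted2 in reverse is weakly decreasing on the FIRST key
lemma sorted2_fst_pairwise (sc : List (Int × String)) :
    (PySem.List.sorted2 sc (fun s => s.1) (fun s => s.2) true).Pairwise
      (fun a b : Int × String => b.1 ≤ a.1) := by
  rw [sorted2_eq_foldl]
  refine pairwise_foldl_insertBy pvBefore _ ?_ ?_ ?_ sc [] List.Pairwise.nil
  · intro a b c hab hbc
    exact le_trans hbc hab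
  · intro a b h
    simp only [pvBefore, Bool.or_eq_true, Bool.and_eq_true, decide_eq_true_eq,
      Bool.not_eq_true', decide_eq_false_iff_not] at h
    rcases h with h | ⟨h, _⟩ <;> omega
  · intro a b h
    simp only [pvBefore, Bool.or_eq_false_iff, Bool.and_eq_false_iff, decide_eq_false_iff_not,
      Bool.not_eq_false', decide_eq_true_eq] at h
    have h1 := h.1
    omega

lemma foldl_append_map {α β : Type} (l : List α) (f : α → β) (acc : List β) :
    l.foldl (fun a x => a ++ [f x]) acc = acc ++ l.map f := by
  induction l generalizing acc with
  | nil => simp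
  | cons x xs ih => simp [ih]

-- invariant of B's single pass: first component is the running max (floored at 0);
-- when positive, the stored family attains it and the counter counts the ties
lemma foldB_inv (sc : List (Int × String)) :
    (sc.foldl pvStep (0, "", 0)).1 = (sc.map Prod.fst).foldl max 0
    ∧ (0 < (sc.foldl pvStep (0, "", 0)).1 →
        ((sc.foldl pvStep (0, "", 0)).1, (sc.foldl pvStep (0, "", 0)).2.1) ∈ sc
        ∧ (sc.foldl pvStep (0, "", 0)).2.2
            = ((sc.filter (fun x => x.1 == (sc.foldl pvStep (0, "", 0)).1)).length : Int)) := by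
  induction sc using List.reverseRecOn with
  | nil => simp
  | append_singleton l x ih =>
    obtain ⟨ih1, ih2⟩ := ih
    have hub : ∀ v ∈ l.map Prod.fst, v ≤ (l.map Prod.fst).foldl max 0 :=
      (PySem.List.le_foldl_max (l.map Prod.fst) 0).2
    simp only [List.foldl_append, List.foldl_cons, List.foldl_nil, List.map_append,
      List.map_cons, List.map_nil, List.filter_append]
    rcases hr : l.foldl pvStep (0, "", 0) with ⟨b, bf, t⟩
    rw [hr] at ih1 ih2
    unfold pvStep
    dsimp only
    split_ifs with h1 h2 <;>
      simp only [show ((b, bf, t) : Int × String × Int).1 = b from rfl,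
        show ((b, bf, t) : Int × String × Int).2.1 = bf from rfl,
        show ((b, bf, t) : Int × String × Int).2.2 = t from rfl]
    · -- new strict maximum
      refine ⟨by omega, fun _ => ⟨by simp, ?_⟩⟩
      have hfl : l.filter (fun y => y.1 == x.1) = [] := by
        rw [List.filter_eq_nil_iff]
        intro y hy
        have := hub y.1 (List.mem_map_of_mem hy)
        simp only [beq_iff_eq]
        omega
      simp [hfl]
    · -- ties the current maximum
      refine ⟨by omega, fun hpos => ?_⟩
      obtain ⟨hmem, hcnt⟩ := ih2 hpos
      refine ⟨List.mem_append_left _ hmem, ?_⟩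
      have hcnt' : t = ((List.filter (fun x : Int × String => x.1 == b) l).length : Int) := hcnt
      have hx : (x.1 == b) = true := by simp [h2]
      rw [show (List.filter (fun y : Int × String => y.1 == ((b, bf, t) : Int × String × Int).1) l)
          = List.filter (fun y : Int × String => y.1 == b) l from rfl]
      simp only [List.filter_cons, hx, if_true, List.filter_nil, List.length_append,
        List.length_cons, List.length_nil]
      omega
    · -- below the current maximum
      refine ⟨by omega, fun hpos => ?_⟩
      obtain ⟨hmem, hcnt⟩ := ih2 hpos
      refine ⟨List.mem_append_left _ hmem, ?_⟩
      have hcnt' : t = ((List.filter (fun x : Int × String => x.1 == b) l).length : Int) := hcnt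
      have hx : (x.1 == b) = false := by simp [h2]
      rw [show (List.filter (fun y : Int × String => y.1 == ((b, bf, t) : Int × String × Int).1) l)
          = List.filter (fun y : Int × String => y.1 == b) l from rfl]
      simp only [List.filter_cons, hx, Bool.false_eq_true, if_false, List.filter_nil,
        List.length_append, List.length_nil]
      omega

-- core: A's sort-and-inspect on the score list equals B's single pass, given nonnegative overlaps
lemma core (sc : List (Int × String)) (h0 : ∀ x ∈ sc, 0 ≤ x.1) :
    (match PySem.List.sorted2 sc (fun s => s.1) (fun s => s.2) true with
     | [] => "mixed"
     | [s0] => if 0 < s0.1 then s0.2 else "mixed"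
     | s0 :: s1 :: _ =>
        if s0.1 = s1.1 ∧ 0 < s0.1 then "mixed"
        else if 0 < s0.1 then s0.2 else "mixed")
    = (if 0 < (sc.foldl pvStep (0, "", 0)).1 ∧ (sc.foldl pvStep (0, "", 0)).2.2 = 1
       then (sc.foldl pvStep (0, "", 0)).2.1 else "mixed") := by
  obtain ⟨ib, imem⟩ := foldB_inv sc
  have hperm := PySem.List.sorted2_perm sc (fun s : Int × String => s.1) (fun s => s.2) true
  have hpw := sorted2_fst_pairwise sc
  rcases hS : PySem.List.sorted2 sc (fun s => s.1) (fun s => s.2) true with _ | ⟨s0, tail⟩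
  · -- sorted2 = [] → sc = []
    rw [hS] at hperm
    have hsc : sc = [] := hperm.symm.eq_nil
    subst hsc
    simp
  · rw [hS] at hperm hpw
    have hs0mem : s0 ∈ sc := hperm.mem_iff.mp (by simp)
    have hmax : ∀ y ∈ sc, y.1 ≤ s0.1 := by
      intro y hy
      rcases List.mem_cons.mp (hperm.mem_iff.mpr hy) with rfl | h
      · exact le_refl _
      · exact (List.pairwise_cons.mp hpw).1 y h
    have hb : (sc.foldl pvStep (0, "", 0)).1 = s0.1 := by
      rw [ib]
      apply le_antisymm
      · rcases PySem.List.foldl_max_mem (sc.map Prod.fst) 0 with h | h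
        · rw [h]; exact h0 s0 hs0mem
        · obtain ⟨y, hy, hyv⟩ := List.mem_map.mp h
          rw [← hyv]; exact hmax y hy
      · exact (PySem.List.le_foldl_max (sc.map Prod.fst) 0).2 s0.1
          (List.mem_map_of_mem hs0mem)
    have hfiltperm : (List.filter (fun x => x.1 == s0.1) (s0 :: tail)).Perm
        (List.filter (fun x => x.1 == s0.1) sc) := List.Perm.filter _ hperm
    rcases tail with _ | ⟨s1, rest⟩
    · -- exactly one score
      have hsc : sc = [s0] := List.perm_singleton.mp hperm.symm
      subst hsc
      dsimp only
      have h00 : 0 ≤ s0.1 := h0 s0 (by simp)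
      simp only [List.foldl_cons, List.foldl_nil]
      unfold pvStep
      dsimp only
      by_cases hp : (0:Int) < s0.1
      · simp [hp]
      · have hz : s0.1 = 0 := by omega
        simp [hz]
    · -- at least two scores
      have hs1 : s1.1 ≤ s0.1 := (List.pairwise_cons.mp hpw).1 s1 (by simp)
      have hrest : ∀ z ∈ rest, z.1 ≤ s1.1 :=
        fun z hz => (List.pairwise_cons.mp (List.pairwise_cons.mp hpw).2).1 z hz
      dsimp only
      by_cases hc1 : s0.1 = s1.1 ∧ 0 < s0.1
      · -- tied positive maximum: both sides "mixed"
        have hpos : 0 < (sc.foldl pvStep (0, "", 0)).1 := by rw [hb]; exact hc1.2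
        obtain ⟨_, hcnt⟩ := imem hpos
        have h2le : 2 ≤ (List.filter (fun x => x.1 == s0.1) (s0 :: s1 :: rest)).length := by
          have hb0 : (s0.1 == s0.1) = true := by simp
          have hb1 : (s1.1 == s0.1) = true := by simp [hc1.1]
          simp only [List.filter_cons, hb0, hb1, if_true, List.length_cons]
          omega
        have hnot : ¬ (0 < (sc.foldl pvStep (0, "", 0)).1 ∧ (sc.foldl pvStep (0, "", 0)).2.2 = 1) := by
          rintro ⟨_, ht⟩
          rw [hcnt, hb, ← hfiltperm.length_eq] at ht
          omega
        rw [if_pos hc1, if_neg hnot]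
      · by_cases hp : 0 < s0.1
        · -- unique positive maximum: A returns the top family, B the stored one
          have hne : s0.1 ≠ s1.1 := fun h => hc1 ⟨h, hp⟩
          have hpos : 0 < (sc.foldl pvStep (0, "", 0)).1 := by rw [hb]; exact hp
          obtain ⟨hmem, hcnt⟩ := imem hpos
          have hfS : List.filter (fun x => x.1 == s0.1) (s0 :: s1 :: rest) = [s0] := by
            have hb0 : (s0.1 == s0.1) = true := by simp
            have hb1 : (s1.1 == s0.1) = false := by simp [Ne.symm hne]
            have hrf : List.filter (fun x => x.1 == s0.1) rest = [] := by
              rw [List.filter_eq_nil_iff]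
              intro z hz
              have hz1 := hrest z hz
              have hz2 : s1.1 < s0.1 := lt_of_le_of_ne hs1 (Ne.symm hne)
              simp only [beq_iff_eq]
              omega
            simp [hb1, hrf]
          have hfsc : List.filter (fun x => x.1 == s0.1) sc = [s0] := by
            rw [hfS] at hfiltperm
            exact List.perm_singleton.mp hfiltperm.symm
          have hone : (sc.foldl pvStep (0, "", 0)).2.2 = 1 := by
            rw [hcnt, hb, hfsc]; simp
          have hmemf : ((sc.foldl pvStep (0, "", 0)).1, (sc.foldl pvStep (0, "", 0)).2.1)
              ∈ List.filter (fun x => x.1 == s0.1) sc := by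
            rw [List.mem_filter]
            exact ⟨hmem, by simp [hb]⟩
          rw [hfsc] at hmemf
          simp only [List.mem_singleton] at hmemf
          have hbf : (sc.foldl pvStep (0, "", 0)).2.1 = s0.2 := by
            have := congrArg Prod.snd hmemf; simpa using this
          rw [if_neg hc1, if_pos hp, if_pos ⟨hpos, hone⟩, hbf]
        · -- maximum is zero: both sides "mixed"
          have hz : s0.1 = 0 := by
            have := h0 s0 hs0mem; omega
          have hbz : ¬ (0 < (sc.foldl pvStep (0, "", 0)).1 ∧ (sc.foldl pvStep (0, "", 0)).2.2 = 1) := by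
            rw [hb]
            rintro ⟨h, _⟩
            omega
          rw [if_neg hc1, if_neg hp, if_neg hbz]

-- ===== VERDICT (by name: the statement is the Claim_ definition above) =====
theorem classify_mutation_family_spec : Claim_equal_classify_mutation_family := by
  intro changed_files families _
  show classify_mutation_family changed_files families
      = classify_mutation_family_alt changed_files families
  unfold classify_mutation_family classify_mutation_family_alt
  by_cases hcf : changed_files = []
  · simp [hcf]
  · simp only [hcf, if_false]
    set changed := PySem.Set.ofList changed_files
    set items := (PySem.Dict.ofList families).items with hitems
    have hscores : items.foldl (fun acc p => acc ++ [(pvOverlap changed p, p.1)]) []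
        = items.map (fun p => (pvOverlap changed p, p.1)) := by
      simpa using foldl_append_map items (fun p => (pvOverlap changed p, p.1)) []
    have hfold : items.foldl
        (fun st p =>
          let overlap := pvOverlap changed p
          if st.1 < overlap then (overlap, p.1, 1)
          else if overlap = st.1 then (st.1, st.2.1, st.2.2 + 1)
          else st) ((0 : Int), "", (0 : Int))
        = (items.map (fun p => (pvOverlap changed p, p.1))).foldl pvStep (0, "", 0) := by
      rw [List.foldl_map]
      rfl
    rw [hscores, hfold]
    apply core
    intro x hx
    obtain ⟨p, _, hpv⟩ := List.mem_map.mp hx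
    rw [← hpv]
    simp [pvOverlap, PySem.Set.len]
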